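-- pv_equiv track=rewrite | github.com/Magenta195/programmers | LV3/공 이동 시뮬레이션.py | solution
-- ===== SOURCE A (Python) =====
-- def solution(n, m, x, y, queries):
--     end = len(queries)-1
--     queries.reverse()
--     left_x, left_y, right_x, right_y = y, x, y, x
--
--     for direction, move in queries :
--         if direction == 0 :
--             right_x += move
--             left_x = 0 if left_x == 0 else left_x+move
--         elif direction == 1 :
--             left_x -= move
--             right_x = m-1 if right_x == m-1 else right_x-move
--         elif direction == 2 :
--             right_y += move
--             left_y = 0 if left_y == 0 else left_y+move
--         else :
--             left_y -= move
--             right_y = n-1 if right_y == n-1 else right_y-move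
--
--         if left_x > m-1 or left_y > n-1 or right_x < 0 or right_y < 0 : return 0
--
--         left_x = max(left_x,0)
--         left_y = max(left_y,0)
--         right_x = min(right_x, m-1)
--         right_y = min(right_y, n-1)
--
--     return (right_x-left_x+1)*(right_y-left_y+1)
-- ===== SOURCE B (Python) =====
-- # B: two independent per-axis passes over the reversed queries (x-axis interval driven by
-- # directions 0/1, y-axis by 2/3; each pass re-checks and clamps only its own interval each step);
-- # like A it reverses `queries` in place.
-- def _x_pass(m, qs, start):
--     lo = hi = start
--     for d, mv in qs:
--         if d == 0:
--             hi += mv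
--             lo = 0 if lo == 0 else lo + mv
--         elif d == 1:
--             lo -= mv
--             hi = m - 1 if hi == m - 1 else hi - mv
--         if lo > m - 1 or hi < 0:
--             return None
--         lo = max(lo, 0)
--         hi = min(hi, m - 1)
--     return (lo, hi)
--
-- def _y_pass(n, qs, start):
--     lo = hi = start
--     for d, mv in qs:
--         if d == 2:
--             hi += mv
--             lo = 0 if lo == 0 else lo + mv
--         elif d not in (0, 1):
--             lo -= mv
--             hi = n - 1 if hi == n - 1 else hi - mv
--         if lo > n - 1 or hi < 0:
--             return None
--         lo = max(lo, 0)
--         hi = min(hi, n - 1)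
--     return (lo, hi)
--
-- def solution(n, m, x, y, queries):
--     queries.reverse()
--     xs = _x_pass(m, queries, y)
--     ys = _y_pass(n, queries, x)
--     if xs is None or ys is None:
--         return 0
--     return (xs[1] - xs[0] + 1) * (ys[1] - ys[0] + 1)
-- ===== Notes on version B (the rewrite author's own statement) =====
-- stated objective: alternative
-- what changed: A interleaves both axes in one loop over four state variables with a four-way early-return check; B decomposes the simulation into two independent single-axis passes over the reversed queries (x-interval driven by directions 0/1, y-interval by 2/3, each pass checking and clamping only its own interval) and multiplies the two surviving interval widths.
import Mathlib
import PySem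

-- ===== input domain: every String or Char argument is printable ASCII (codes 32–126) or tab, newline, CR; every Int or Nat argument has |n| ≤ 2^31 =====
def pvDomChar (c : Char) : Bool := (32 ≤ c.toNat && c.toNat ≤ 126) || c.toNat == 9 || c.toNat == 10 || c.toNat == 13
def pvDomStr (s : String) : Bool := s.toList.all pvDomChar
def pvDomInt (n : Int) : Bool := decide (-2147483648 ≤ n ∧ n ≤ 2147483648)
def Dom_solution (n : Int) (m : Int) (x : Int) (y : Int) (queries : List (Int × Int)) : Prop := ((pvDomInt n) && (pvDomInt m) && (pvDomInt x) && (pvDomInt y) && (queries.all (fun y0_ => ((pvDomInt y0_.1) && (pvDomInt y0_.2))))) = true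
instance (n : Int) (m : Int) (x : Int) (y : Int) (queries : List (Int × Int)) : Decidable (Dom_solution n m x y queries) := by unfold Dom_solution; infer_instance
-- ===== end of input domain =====

-- B replaces A's single interleaved loop by two independent single-axis passes (alternative
-- decomposition, same cost). A reverses `queries` in place (B does the same in Python);
-- the equivalence proved here is about the RETURN value only.

-- ===== PORT A =====
-- the loop body of A, over the already-reversed query list; state (left_x, left_y, right_x, right_y)
def solAGo (n m : Int) : List (Int × Int) → Int → Int → Int → Int → Int
  | [], lx, ly, rx, ry => (rx - lx + 1) * (ry - ly + 1)
  | (d, mv) :: qs, lx, ly, rx, ry =>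
    if d = 0 then
      let rx1 := rx + mv
      let lx1 := if lx = 0 then 0 else lx + mv
      if lx1 > m - 1 ∨ ly > n - 1 ∨ rx1 < 0 ∨ ry < 0 then 0
      else solAGo n m qs (max lx1 0) (max ly 0) (min rx1 (m - 1)) (min ry (n - 1))
    else if d = 1 then
      let lx1 := lx - mv
      let rx1 := if rx = m - 1 then m - 1 else rx - mv
      if lx1 > m - 1 ∨ ly > n - 1 ∨ rx1 < 0 ∨ ry < 0 then 0
      else solAGo n m qs (max lx1 0) (max ly 0) (min rx1 (m - 1)) (min ry (n - 1))
    else if d = 2 then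
      let ry1 := ry + mv
      let ly1 := if ly = 0 then 0 else ly + mv
      if lx > m - 1 ∨ ly1 > n - 1 ∨ rx < 0 ∨ ry1 < 0 then 0
      else solAGo n m qs (max lx 0) (max ly1 0) (min rx (m - 1)) (min ry1 (n - 1))
    else
      let ly1 := ly - mv
      let ry1 := if ry = n - 1 then n - 1 else ry - mv
      if lx > m - 1 ∨ ly1 > n - 1 ∨ rx < 0 ∨ ry1 < 0 then 0
      else solAGo n m qs (max lx 0) (max ly1 0) (min rx (m - 1)) (min ry1 (n - 1))

def solution (n : Int) (m : Int) (x : Int) (y : Int) (queries : List (Int × Int)) : Int :=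
  solAGo n m queries.reverse y x y x

-- ===== PORT B =====
-- x-axis pass: directions 0/1 move the interval, any other step only re-checks and clamps it;
-- none = the x-interval went out of bounds at some step
def xPass (m : Int) : List (Int × Int) → Int → Int → Option (Int × Int)
  | [], lo, hi => some (lo, hi)
  | (d, mv) :: qs, lo, hi =>
    let lo1 := if d = 0 then (if lo = 0 then 0 else lo + mv) else if d = 1 then lo - mv else lo
    let hi1 := if d = 0 then hi + mv else if d = 1 then (if hi = m - 1 then m - 1 else hi - mv) else hi
    if lo1 > m - 1 ∨ hi1 < 0 then none
    else xPass m qs (max lo1 0) (min hi1 (m - 1))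

-- y-axis pass: direction 2 moves up, any direction outside {0,1,2} moves down,
-- directions 0/1 only re-check and clamp
def yPass (n : Int) : List (Int × Int) → Int → Int → Option (Int × Int)
  | [], lo, hi => some (lo, hi)
  | (d, mv) :: qs, lo, hi =>
    let lo1 := if d = 2 then (if lo = 0 then 0 else lo + mv) else if ¬(d = 0 ∨ d = 1) then lo - mv else lo
    let hi1 := if d = 2 then hi + mv else if ¬(d = 0 ∨ d = 1) then (if hi = n - 1 then n - 1 else hi - mv) else hi
    if lo1 > n - 1 ∨ hi1 < 0 then none
    else yPass n qs (max lo1 0) (min hi1 (n - 1))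

def solution_alt (n : Int) (m : Int) (x : Int) (y : Int) (queries : List (Int × Int)) : Int :=
  let qs := queries.reverse
  match xPass m qs y y, yPass n qs x x with
  | some (lox, hix), some (loy, hiy) => (hix - lox + 1) * (hiy - loy + 1)
  | _, _ => 0

-- ===== PRECONDITION & SPEC =====
def Spec_solution (n : Int) (m : Int) (x : Int) (y : Int) (queries : List (Int × Int)) (out : Int) : Prop := out = solution_alt n m x y queries
instance (n : Int) (m : Int) (x : Int) (y : Int) (queries : List (Int × Int)) (out : Int) : Decidable (Spec_solution n m x y queries out) := by unfold Spec_solution; infer_instance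

-- ===== CLAIM (what is proved, stated in full; the proofs are below) =====
def Claim_equal_solution : Prop := ∀ (n : Int) (m : Int) (x : Int) (y : Int) (queries : List (Int × Int)), Dom_solution n m x y queries → Spec_solution n m x y queries (solution n m x y queries)

-- ===== LEMMAS AND PROOFS =====

-- the combiner used by solution_alt, named for the proofs
def combine (ox oy : Option (Int × Int)) : Int :=
  match ox, oy with
  | some (lox, hix), some (loy, hiy) => (hix - lox + 1) * (hiy - loy + 1)
  | _, _ => 0

-- combine reduces to 0 as soon as one pass fails
theorem combine_none_left (o : Option (Int × Int)) : combine none o = 0 := by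
  cases o with
  | none => rfl
  | some p => rfl

theorem combine_none_right (o : Option (Int × Int)) : combine o none = 0 := by
  cases o with
  | none => rfl
  | some p => rfl

-- One step of A equals one step of each pass: A's four-way check is exactly
-- (x-check ∨ y-check) on the two independently evolving axis intervals.
theorem step_eq (n m LX LY RX RY : Int) (qs : List (Int × Int))
    (ih : ∀ lx ly rx ry, solAGo n m qs lx ly rx ry = combine (xPass m qs lx rx) (yPass n qs ly ry)) :
    (if LX > m - 1 ∨ LY > n - 1 ∨ RX < 0 ∨ RY < 0 then 0
     else solAGo n m qs (max LX 0) (max LY 0) (min RX (m - 1)) (min RY (n - 1)))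
    = combine (if LX > m - 1 ∨ RX < 0 then none else xPass m qs (max LX 0) (min RX (m - 1)))
              (if LY > n - 1 ∨ RY < 0 then none else yPass n qs (max LY 0) (min RY (n - 1))) := by
  by_cases hcx : LX > m - 1 ∨ RX < 0 <;> by_cases hcy : LY > n - 1 ∨ RY < 0
  · rw [if_pos (by tauto), if_pos hcx, combine_none_left]
  · rw [if_pos (by tauto), if_pos hcx, combine_none_left]
  · rw [if_pos (by tauto), if_neg hcx, if_pos hcy, combine_none_right]
  · rw [if_neg (by tauto), if_neg hcx, if_neg hcy, ih]

-- Main lemma: A's interleaved loop equals the combination of the two single-axis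
-- passes, for every starting state.
theorem go_eq (n m : Int) :
    ∀ (qs : List (Int × Int)) (lx ly rx ry : Int),
      solAGo n m qs lx ly rx ry = combine (xPass m qs lx rx) (yPass n qs ly ry) := by
  intro qs
  induction qs with
  | nil => intro lx ly rx ry; simp [solAGo, xPass, yPass, combine]
  | cons q qs ih =>
    obtain ⟨d, mv⟩ := q
    intro lx ly rx ry
    simp only [solAGo, xPass, yPass]
    by_cases hd0 : d = 0 <;> by_cases hd1 : d = 1 <;> by_cases hd2 : d = 2 <;>
      simp only [hd0, hd1, hd2, reduceIte, Int.reduceEq, not_true, not_false_iff,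
        or_self, or_true, true_or, false_or, or_false, ite_true, ite_false, if_true, if_false] <;>
      exact step_eq n m _ _ _ _ qs ih

-- ===== VERDICT (by name: the statement is the Claim_ definition above) =====
theorem solution_spec : Claim_equal_solution := by
  intro n m x y queries _
  unfold Spec_solution solution solution_alt
  rw [go_eq n m queries.reverse y x y x]
  rfl
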